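-- pv_equiv track=rewrite | github.com/via-shcherba/AI_project | utility/service_methods.py | filter_history
-- ===== SOURCE A (Python) =====
-- def filter_history(data):
--     filtered_data = [item for item in data if item.get('type', '') in ['request', 'message', 'analytics']]
--     first_request_index = next((i for i, item in enumerate(filtered_data) if item['type'] == 'request'), -1)
--
--     if first_request_index == -1:
--         return []
--
--     output_data = []
--     for item in filtered_data[first_request_index:]:
--         if item['type'] == 'request':
--             output_data.append(item)
--         elif item['type'] == 'message' and output_data:
--             output_data.append(item)
--         elif item['type'] == 'analytics':
--             output_data.append(item)
--     return output_data
-- ===== SOURCE B (Python) =====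
-- def filter_history(data):
--     # Single pass: skip items until the first 'request', then keep every
--     # item whose type is request/message/analytics.
--     output = []
--     for item in data:
--         t = item.get('type', '')
--         if output:
--             if t in ('request', 'message', 'analytics'):
--                 output.append(item)
--         elif t == 'request':
--             output.append(item)
--     return output
-- ===== Notes on version B (the rewrite author's own statement) =====
-- stated objective: simpler
-- what changed: A builds a filtered list, searches it for the first 'request' index and then re-runs a conditional accumulation loop over the slice; B is one fold over the raw input that appends nothing until the first 'request' item and from then on appends every item whose type is request/message/analytics.
import Mathlib
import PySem

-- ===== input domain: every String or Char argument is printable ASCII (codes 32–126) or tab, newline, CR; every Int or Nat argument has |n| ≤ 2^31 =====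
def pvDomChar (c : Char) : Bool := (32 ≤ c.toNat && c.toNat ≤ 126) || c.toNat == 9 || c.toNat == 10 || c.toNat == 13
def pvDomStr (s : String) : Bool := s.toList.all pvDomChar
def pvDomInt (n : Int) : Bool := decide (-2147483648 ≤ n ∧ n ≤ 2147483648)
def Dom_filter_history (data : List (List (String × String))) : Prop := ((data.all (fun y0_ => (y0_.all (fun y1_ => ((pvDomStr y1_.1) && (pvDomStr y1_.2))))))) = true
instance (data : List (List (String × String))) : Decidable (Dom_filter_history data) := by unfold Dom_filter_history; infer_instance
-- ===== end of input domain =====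

-- B replaces A's filter + index-search + conditional-accumulation pipeline with a single pass
-- over the input that skips items until the first 'request' and then keeps every allowed item (simpler).


-- shared by both ports: item.get('type', '') (association list read as a Python dict: first match)
def pvType (item : List (String × String)) : String := (PySem.Dict.mk item).getD "type" ""

-- ===== PORT A =====
-- next((i for i, item in enumerate(filtered_data) if item['type'] == 'request'), -1);
-- item['type'] ported as pvType (default ''): exact here, every filtered item has a 'type' key.
def pvFriA : List (List (String × String)) → Int → Int
  | [], _ => -1
  | it :: rest, i => if pvType it == "request" then i else pvFriA rest (i + 1)

def filter_history (data : List (List (String × String))) : List (List (String × String)) :=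
  let filtered_data := data.filter (fun item => ["request", "message", "analytics"].contains (pvType item))
  let first_request_index := pvFriA filtered_data 0
  if first_request_index == -1 then []
  else
    (PySem.List.slice filtered_data (some first_request_index) none).foldl
      (fun output_data item =>
        if pvType item == "request" then output_data ++ [item]
        else if pvType item == "message" && output_data != [] then output_data ++ [item]
        else if pvType item == "analytics" then output_data ++ [item]
        else output_data) []

-- ===== PORT B =====
def filter_history_alt (data : List (List (String × String))) : List (List (String × String)) :=
  data.foldl
    (fun output item =>
      let t := pvType item
      if output != [] then
        (if ["request", "message", "analytics"].contains t then output ++ [item] else output)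
      else if t == "request" then output ++ [item] else output) []

-- ===== PRECONDITION & SPEC =====
def Spec_filter_history (data : List (List (String × String))) (out : List (List (String × String))) : Prop := out = filter_history_alt data
instance (data : List (List (String × String))) (out : List (List (String × String))) : Decidable (Spec_filter_history data out) := by unfold Spec_filter_history; infer_instance

-- ===== CLAIM (what is proved, stated in full; the proofs are below) =====
def Claim_equal_filter_history : Prop := ∀ (data : List (List (String × String))), Dom_filter_history data → Spec_filter_history data (filter_history data)

-- ===== LEMMAS AND PROOFS =====
def pvAllowed (it : List (String × String)) : Bool := ["request", "message", "analytics"].contains (pvType it)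
def pvIsReq (it : List (String × String)) : Bool := pvType it == "request"
def pvCanon (data : List (List (String × String))) : List (List (String × String)) :=
  (data.dropWhile (fun it => !pvIsReq it)).filter pvAllowed

theorem b_go_nonempty (l : List (List (String × String))) (out : List (List (String × String))) (h : out ≠ []) :
    l.foldl (fun output item =>
      let t := pvType item
      if output != [] then
        (if ["request", "message", "analytics"].contains t then output ++ [item] else output)
      else if t == "request" then output ++ [item] else output) out = out ++ l.filter pvAllowed := by
  induction l generalizing out with
  | nil => simp
  | cons x xs ih =>
    have hne : (out != []) = true := by simpa using h
    simp only [List.foldl_cons, List.filter_cons, hne, if_true]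
    rw [show (["request", "message", "analytics"].contains (pvType x)) = pvAllowed x from rfl]
    cases hx : pvAllowed x with
    | true =>
      simp only [if_true]
      rw [ih (out ++ [x]) (by simp), List.append_assoc]
      rfl
    | false =>
      simp only [Bool.false_eq_true, if_false]
      exact ih out h

theorem b_eq_canon (l : List (List (String × String))) :
    l.foldl (fun output item =>
      let t := pvType item
      if output != [] then
        (if ["request", "message", "analytics"].contains t then output ++ [item] else output)
      else if t == "request" then output ++ [item] else output) [] = pvCanon l := by
  induction l with
  | nil => simp [pvCanon]
  | cons x xs ih =>
    simp only [List.foldl_cons, bne_self_eq_false, Bool.false_eq_true, if_false]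
    rw [show ((pvType x == "request")) = pvIsReq x from rfl]
    cases hx : pvIsReq x with
    | true =>
      simp only [if_true, List.nil_append]
      rw [b_go_nonempty xs [x] (by simp)]
      have hall : pvAllowed x = true := by
        have : pvType x = "request" := by simpa [pvIsReq] using hx
        simp [pvAllowed, this]
      simp [pvCanon, List.dropWhile_cons, hx, List.filter_cons, hall]
    | false =>
      simp only [Bool.false_eq_true, if_false]
      rw [ih]
      simp [pvCanon, List.dropWhile_cons, hx]

theorem fri_spec (l : List (List (String × String))) (i : Int) :
    pvFriA l i = (l.findIdx? pvIsReq).elim (-1) (fun n => i + n) := by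
  induction l generalizing i with
  | nil => simp [pvFriA]
  | cons x xs ih =>
    rw [pvFriA, show ((pvType x == "request")) = pvIsReq x from rfl, List.findIdx?_cons]
    cases hx : pvIsReq x with
    | true => simp
    | false =>
      simp only [Bool.false_eq_true, if_false, ih (i + 1)]
      cases h : xs.findIdx? pvIsReq with
      | none => simp
      | some n => simp; omega

theorem a_loop_all_kept (l : List (List (String × String))) (out : List (List (String × String)))
    (h : out ≠ []) (hall : ∀ it ∈ l, pvAllowed it = true) :
    l.foldl (fun output_data item =>
        if pvType item == "request" then output_data ++ [item]
        else if pvType item == "message" && output_data != [] then output_data ++ [item]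
        else if pvType item == "analytics" then output_data ++ [item]
        else output_data) out = out ++ l := by
  induction l generalizing out with
  | nil => simp
  | cons x xs ih =>
    have hx := hall x (by simp)
    have hne : (out != []) = true := by simpa using h
    have hx' : pvType x = "request" ∨ pvType x = "message" ∨ pvType x = "analytics" := by
      simpa [pvAllowed] using hx
    have hstep : (if pvType x == "request" then out ++ [x]
        else if pvType x == "message" && out != [] then out ++ [x]
        else if pvType x == "analytics" then out ++ [x]
        else out) = out ++ [x] := by
      rcases hx' with h1 | h1 | h1 <;> simp [h1, hne]
    rw [List.foldl_cons, hstep, ih (out ++ [x]) (by simp) (fun it hit => hall it (by simp [hit]))]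
    simp

theorem drop_findIdx (l : List (List (String × String))) (n : Nat) (h : l.findIdx? pvIsReq = some n) :
    ∃ x rest, l.drop n = x :: rest ∧ pvIsReq x = true := by
  induction l generalizing n with
  | nil => simp at h
  | cons x xs ih =>
    rw [List.findIdx?_cons] at h
    cases hx : pvIsReq x with
    | true => simp [hx] at h; subst h; exact ⟨x, xs, rfl, hx⟩
    | false =>
      simp only [hx, Bool.false_eq_true, if_false, Option.map_eq_some_iff] at h
      obtain ⟨m, hm, rfl⟩ := h
      simpa using ih m hm

theorem canon_none (data : List (List (String × String)))
    (h : (data.filter pvAllowed).findIdx? pvIsReq = none) : pvCanon data = [] := by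
  induction data with
  | nil => rfl
  | cons x xs ih =>
    rw [List.filter_cons] at h
    cases hx : pvIsReq x with
    | true =>
      exfalso
      have hall : pvAllowed x = true := by
        have : pvType x = "request" := by simpa [pvIsReq] using hx
        simp [pvAllowed, this]
      rw [if_pos hall, List.findIdx?_cons, hx] at h
      simp at h
    | false =>
      have htail : (xs.filter pvAllowed).findIdx? pvIsReq = none := by
        by_cases ha : pvAllowed x = true
        · rw [if_pos ha, List.findIdx?_cons, hx] at h
          simpa using h
        · rw [if_neg ha] at h
          exact h
      have := ih htail
      simpa [pvCanon, List.dropWhile_cons, hx] using this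

theorem canon_some (data : List (List (String × String))) (n : Nat)
    (h : (data.filter pvAllowed).findIdx? pvIsReq = some n) :
    (data.filter pvAllowed).drop n = pvCanon data := by
  induction data generalizing n with
  | nil => simp at h
  | cons x xs ih =>
    rw [List.filter_cons] at h ⊢
    cases hx : pvIsReq x with
    | true =>
      have hall : pvAllowed x = true := by
        have : pvType x = "request" := by simpa [pvIsReq] using hx
        simp [pvAllowed, this]
      rw [if_pos hall] at h ⊢
      rw [List.findIdx?_cons, hx] at h
      simp at h
      subst h
      simp [pvCanon, List.dropWhile_cons, hx, List.filter_cons, hall]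
    | false =>
      by_cases ha : pvAllowed x = true
      · rw [if_pos ha] at h ⊢
        rw [List.findIdx?_cons, hx] at h
        simp only [Bool.false_eq_true, if_false, Option.map_eq_some_iff] at h
        obtain ⟨m, hm, rfl⟩ := h
        rw [List.drop_succ_cons, ih m hm]
        simp [pvCanon, List.dropWhile_cons, hx]
      · rw [if_neg ha] at h ⊢
        rw [ih n h]
        simp [pvCanon, List.dropWhile_cons, hx]

-- ===== VERDICT (by name: the statement is the Claim_ definition above) =====
theorem filter_history_spec : Claim_equal_filter_history := by
  intro data _
  unfold Spec_filter_history
  rw [filter_history_alt, b_eq_canon]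
  rw [filter_history]
  have hfl : (fun item => ["request", "message", "analytics"].contains (pvType item)) = pvAllowed := rfl
  simp only [hfl]
  rw [fri_spec (data.filter pvAllowed) 0]
  cases hidx : (data.filter pvAllowed).findIdx? pvIsReq with
  | none =>
    simp only [hidx, Option.elim]
    rw [canon_none data hidx]
    simp
  | some n =>
    simp only [hidx, Option.elim]
    have h1 : ((0 + (n : Int)) == (-1 : Int)) = false := by simp
    rw [h1]
    simp only [Bool.false_eq_true, if_false]
    rw [show (0 + (n : Int)) = ((n : Nat) : Int) by omega]
    rw [PySem.List.slice_from_natCast]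
    obtain ⟨x, rest, hdrop, hreq⟩ := drop_findIdx _ n hidx
    rw [← canon_some data n hidx, hdrop]
    rw [List.foldl_cons, show ((pvType x == "request")) = pvIsReq x from rfl, hreq, if_pos rfl,
      List.nil_append]
    have hall : ∀ it ∈ rest, pvAllowed it = true := by
      intro it hit
      have : it ∈ data.filter pvAllowed := by
        apply List.mem_of_mem_drop (i := n)
        rw [hdrop]; simp [hit]
      exact (List.mem_filter.mp this).2
    rw [a_loop_all_kept rest [x] (by simp) hall]
    rfl
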